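-- pv_equiv track=rewrite | github.com/ashaady/frontebd-juridique | backend/app/main.py | _extract_query_for_rag
-- ===== SOURCE A (Python) =====
-- from typing import Any, AsyncGenerator
--
-- def _extract_query_for_rag(messages: list[dict[str, Any]]) -> tuple[str | None, str | None]:
--     normalized: list[tuple[str | None, str]] = []
--     for message in messages:
--         role_raw = message.get("role")
--         role = role_raw.strip().lower() if isinstance(role_raw, str) else None
--         content = message.get("content")
--         if not isinstance(content, str):
--             continue
--         text = content.strip()
--         if not text:
--             continue
--         normalized.append((role, text))
--
--     if not normalized:
--         return None, None
--
--     for role, text in reversed(normalized):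
--         if role == "user":
--             return text, "user"
--
--     for role, text in reversed(normalized):
--         if role != "assistant":
--             return text, "non_assistant_fallback"
--
--     return normalized[-1][1], "last_message_fallback"
-- ===== SOURCE B (Python) =====
-- def _extract_query_for_rag(messages):
--     last_user = None
--     last_non_assistant = None
--     last_message = None
--     for message in messages:
--         role_raw = message.get("role")
--         role = role_raw.strip().lower() if isinstance(role_raw, str) else None
--         content = message.get("content")
--         if not isinstance(content, str):
--             continue
--         text = content.strip()
--         if not text:
--             continue
--         if role == "user":
--             last_user = text
--         if role != "assistant":
--             last_non_assistant = text
--         last_message = text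
--     if last_message is None:
--         return None, None
--     if last_user is not None:
--         return last_user, "user"
--     if last_non_assistant is not None:
--         return last_non_assistant, "non_assistant_fallback"
--     return last_message, "last_message_fallback"
-- ===== Notes on version B (the rewrite author's own statement) =====
-- stated objective: alternative
-- what changed: Replaced A's build-a-normalized-list-then-three-reversed-scans structure with a single forward pass that maintains three running candidates (last user, last non-assistant, last message) and picks among them by priority at the end.
import Mathlib
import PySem

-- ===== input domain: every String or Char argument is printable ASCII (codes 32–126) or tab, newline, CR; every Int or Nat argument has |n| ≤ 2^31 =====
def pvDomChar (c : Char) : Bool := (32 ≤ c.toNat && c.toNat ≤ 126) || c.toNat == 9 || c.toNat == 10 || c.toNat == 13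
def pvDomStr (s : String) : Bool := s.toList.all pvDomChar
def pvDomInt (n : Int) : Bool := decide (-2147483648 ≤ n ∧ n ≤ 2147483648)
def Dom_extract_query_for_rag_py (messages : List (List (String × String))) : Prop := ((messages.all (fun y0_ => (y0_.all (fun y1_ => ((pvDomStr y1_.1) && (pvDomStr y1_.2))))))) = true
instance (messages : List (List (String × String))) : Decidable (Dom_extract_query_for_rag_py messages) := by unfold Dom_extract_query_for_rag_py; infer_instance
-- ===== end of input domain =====

-- B replaces A's build-then-three-reversed-scans shape by ONE forward pass maintaining three
-- running candidates (last user / last non-assistant / last message); objective: alternative decomposition.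

-- shared normalization of one message (identical lines in both Pythons):
-- role = role_raw.strip().lower() if role present; skip if no content or blank after strip
def pvNorm (message : List (String × String)) : Option (Option String × String) :=
  let role : Option String :=
    (message.find? (fun p => p.1 == "role")).map (fun p => PySem.Str.lower (PySem.Str.strip p.2))
  match (message.find? (fun p => p.1 == "content")).map (fun p => p.2) with
  | none => none
  | some c =>
    let text := PySem.Str.strip c
    if text = "" then none else some (role, text)

-- ===== PORT A =====
-- 'for role, text in reversed(normalized): if role == "user": return text'
def pvFindUser : List (Option String × String) → Option String
  | [] => none
  | (r, t) :: rest => if r = some "user" then some t else pvFindUser rest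

-- 'for role, text in reversed(normalized): if role != "assistant": return text'
def pvFindNA : List (Option String × String) → Option String
  | [] => none
  | (r, t) :: rest => if r ≠ some "assistant" then some t else pvFindNA rest

def extract_query_for_rag_py (messages : List (List (String × String))) : Option String × Option String :=
  let normalized := messages.foldl
    (fun acc m => match pvNorm m with | some p => acc ++ [p] | none => acc) []
  if normalized = [] then (none, none)
  else
    match pvFindUser normalized.reverse with
    | some t => (some t, some "user")
    | none =>
      match pvFindNA normalized.reverse with
      | some t => (some t, some "non_assistant_fallback")
      | none =>
        match PySem.List.pyGet? normalized (-1) with  -- normalized[-1]; nonempty here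
        | some p => (some p.2, some "last_message_fallback")
        | none => (none, none)

-- ===== PORT B =====
-- single-pass candidate update for one kept (role, text)
def pvStep (s : Option String × Option String × Option String) (p : Option String × String) :
    Option String × Option String × Option String :=
  ((if p.1 = some "user" then some p.2 else s.1),
   (if p.1 ≠ some "assistant" then some p.2 else s.2.1),
   some p.2)

def extract_query_for_rag_py_alt (messages : List (List (String × String))) : Option String × Option String :=
  let s := messages.foldl
    (fun s m => match pvNorm m with | some p => pvStep s p | none => s) (none, none, none)
  match s.2.2 with
  | none => (none, none)
  | some mt =>
    match s.1 with
    | some ut => (some ut, some "user")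
    | none =>
      match s.2.1 with
      | some nt => (some nt, some "non_assistant_fallback")
      | none => (some mt, some "last_message_fallback")

-- ===== PRECONDITION & SPEC =====
def Spec_extract_query_for_rag_py (messages : List (List (String × String))) (out : Option String × Option String) : Prop := out = extract_query_for_rag_py_alt messages
instance (messages : List (List (String × String))) (out : Option String × Option String) : Decidable (Spec_extract_query_for_rag_py messages out) := by unfold Spec_extract_query_for_rag_py; infer_instance

-- ===== CLAIM (what is proved, stated in full; the proofs are below) =====
def Claim_equal_extract_query_for_rag_py : Prop := ∀ (messages : List (List (String × String))), Dom_extract_query_for_rag_py messages → Spec_extract_query_for_rag_py messages (extract_query_for_rag_py messages)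

-- ===== LEMMAS AND PROOFS =====

def pvNormList (messages : List (List (String × String))) : List (Option String × String) :=
  messages.flatMap (fun m => (pvNorm m).toList)

theorem pvA_fold (messages : List (List (String × String))) :
    messages.foldl (fun acc m => match pvNorm m with | some p => acc ++ [p] | none => acc) [] =
      pvNormList messages := by
  have h : (fun (acc : List (Option String × String)) m =>
      match pvNorm m with | some p => acc ++ [p] | none => acc) =
      fun acc m => acc ++ (pvNorm m).toList := by
    funext acc m; cases pvNorm m <;> simp
  rw [h, PySem.List.foldl_append_eq_flatMap]
  rfl

theorem pvB_fold (messages : List (List (String × String)))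
    (s : Option String × Option String × Option String) :
    messages.foldl (fun s m => match pvNorm m with | some p => pvStep s p | none => s) s =
      (pvNormList messages).foldl pvStep s := by
  induction messages generalizing s with
  | nil => rfl
  | cons m ms ih =>
    simp only [List.foldl_cons, pvNormList, List.flatMap_cons, List.foldl_append]
    cases pvNorm m <;> simp [ih, pvNormList]

theorem pvFindUser_append (xs : List (Option String × String)) (p : Option String × String) :
    pvFindUser (xs ++ [p]) =
      (pvFindUser xs).or (if p.1 = some "user" then some p.2 else none) := by
  induction xs with
  | nil => cases p with | mk r t => simp [pvFindUser]
  | cons q qs ih => cases q with | mk r t => simp [pvFindUser]; split <;> simp [ih]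

theorem pvFindNA_append (xs : List (Option String × String)) (p : Option String × String) :
    pvFindNA (xs ++ [p]) =
      (pvFindNA xs).or (if p.1 ≠ some "assistant" then some p.2 else none) := by
  induction xs with
  | nil => cases p with | mk r t => simp [pvFindNA]
  | cons q qs ih => cases q with | mk r t => simp [pvFindNA]; split <;> simp [ih]

theorem pvCand (l : List (Option String × String))
    (s : Option String × Option String × Option String) :
    l.foldl pvStep s =
      ((pvFindUser l.reverse).or s.1,
       (pvFindNA l.reverse).or s.2.1,
       (l.reverse.head?.map Prod.snd).or s.2.2) := by
  induction l generalizing s with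
  | nil => simp [pvFindUser, pvFindNA]
  | cons p ps ih =>
    simp only [List.foldl_cons, List.reverse_cons, ih, pvFindUser_append, pvFindNA_append,
      List.head?_append, Option.or_assoc]
    cases ps.reverse.head? <;> simp [pvStep] <;> constructor <;> split <;> simp

theorem extract_spec_aux (messages : List (List (String × String))) :
    extract_query_for_rag_py messages = extract_query_for_rag_py_alt messages := by
  unfold extract_query_for_rag_py extract_query_for_rag_py_alt
  rw [pvA_fold, pvB_fold, pvCand]
  simp only [Option.or_none]
  set l := pvNormList messages with hl
  rcases hrev : l.reverse.head? with _ | p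
  · -- l = []
    have hnil : l.reverse = [] := List.head?_eq_none_iff.mp hrev
    have : l = [] := by simpa using hnil
    simp [this]
  · -- l ≠ []
    have hne : l ≠ [] := by
      intro h; rw [h] at hrev; simp at hrev
    rw [if_neg hne]
    cases hu : pvFindUser l.reverse with
    | some t => simp
    | none =>
      cases hna : pvFindNA l.reverse with
      | some t => simp
      | none =>
        have hlast : PySem.List.pyGet? l (-1) = some p := by
          rw [PySem.List.pyGet?_neg_one, ← List.head?_reverse, hrev]
        simp [hlast]

-- ===== VERDICT (by name: the statement is the Claim_ definition above) =====
theorem extract_query_for_rag_py_spec : Claim_equal_extract_query_for_rag_py := by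
  intro messages _
  exact extract_spec_aux messages
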